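-- pv_equiv track=rewrite | github.com/storrer/udd-programming-practice | wordplay/23_longest_free_wheel_of_fortune_words.py | find_longest_match
-- ===== SOURCE A (Python) =====
-- def word_matches_all(word: str):
--     free_letters = 'RSTLNE'
--     return all(letter in free_letters for letter in word)
--
-- def find_longest_match(array):
--     max_length = 0
--     longest_words = []
--
--     for word in array:
--         if word_matches_all(word):
--             if len(word) == max_length:
--                 longest_words.append(word)
--             elif len(word) > max_length:
--                 max_length = len(word)
--                 longest_words = [word]
--     return (max_length,longest_words)
-- ===== SOURCE B (Python) =====
-- def word_matches_all(word: str):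
--     free_letters = 'RSTLNE'
--     return all(letter in free_letters for letter in word)
--
-- def find_longest_match(array):
--     matches = [w for w in array if word_matches_all(w)]
--     max_length = max(map(len, matches), default=0)
--     longest_words = [w for w in matches if len(w) == max_length]
--     return (max_length, longest_words)
-- ===== Notes on version B (the rewrite author's own statement) =====
-- stated objective: simpler
-- what changed: Replaces A's single loop with running-max state and list resets by a three-pass decomposition: filter the RSTLNE-only words, take max(map(len, ...), default=0), then collect the words of that length in order.
import Mathlib
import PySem

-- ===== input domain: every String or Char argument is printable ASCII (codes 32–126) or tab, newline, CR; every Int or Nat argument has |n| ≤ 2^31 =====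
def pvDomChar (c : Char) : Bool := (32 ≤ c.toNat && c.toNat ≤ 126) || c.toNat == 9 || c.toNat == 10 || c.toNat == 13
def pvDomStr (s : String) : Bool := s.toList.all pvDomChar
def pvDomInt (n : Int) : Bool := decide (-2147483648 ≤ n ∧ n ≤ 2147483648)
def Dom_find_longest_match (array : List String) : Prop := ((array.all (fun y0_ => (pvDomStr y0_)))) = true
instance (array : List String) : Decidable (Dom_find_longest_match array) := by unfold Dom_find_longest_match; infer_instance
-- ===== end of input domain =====

-- B replaces A's single running-max loop by a three-pass decomposition (filter, max with default 0, collect); same results, similar cost.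


-- ===== PORT A =====
-- shared module helper: word_matches_all (the same source line in both Pythons)
def word_matches_all (word : String) : Bool :=
  word.toList.all (fun letter => PySem.Str.isIn (String.ofList [letter]) "RSTLNE")

def find_longest_match (array : List String) : Int × List String :=
  array.foldl (fun (st : Int × List String) word =>
    if word_matches_all word then
      if PySem.Str.len word = st.1 then (st.1, st.2 ++ [word])
      else if PySem.Str.len word > st.1 then (PySem.Str.len word, [word])
      else st
    else st) (0, [])

-- ===== PORT B =====
def find_longest_match_alt (array : List String) : Int × List String :=
  let ms := array.filter word_matches_all
  let max_length := PySem.List.maxD (ms.map PySem.Str.len) id 0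
  let longest_words := ms.filter (fun w => PySem.Str.len w == max_length)
  (max_length, longest_words)

-- ===== PRECONDITION & SPEC =====
def Spec_find_longest_match (array : List String) (out : Int × List String) : Prop := out = find_longest_match_alt array
instance (array : List String) (out : Int × List String) : Decidable (Spec_find_longest_match array out) := by unfold Spec_find_longest_match; infer_instance

-- ===== CLAIM (what is proved, stated in full; the proofs are below) =====
def Claim_equal_find_longest_match : Prop := ∀ (array : List String), Dom_find_longest_match array → Spec_find_longest_match array (find_longest_match array)

-- ===== LEMMAS AND PROOFS =====

-- the running max of lengths of a filtered prefix, and the collected words of that length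
def pvM (fs : List String) : Int := (fs.map PySem.Str.len).foldl max 0
def pvC (fs : List String) : List String := fs.filter (fun w => PySem.Str.len w == pvM fs)

lemma pvM_append (fs : List String) (w : String) :
    pvM (fs ++ [w]) = max (pvM fs) (PySem.Str.len w) := by
  simp [pvM, List.foldl_append]

lemma pvM_ub (fs : List String) (w : String) (hw : w ∈ fs) :
    PySem.Str.len w ≤ pvM fs := by
  exact (PySem.List.le_foldl_max (fs.map PySem.Str.len) 0).2 _ (List.mem_map_of_mem hw)

lemma pvC_append (fs : List String) (w : String) :
    pvC (fs ++ [w]) =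
      if PySem.Str.len w = pvM fs then pvC fs ++ [w]
      else if PySem.Str.len w > pvM fs then [w]
      else pvC fs := by
  unfold pvC
  rw [pvM_append]
  rcases lt_trichotomy (PySem.Str.len w) (pvM fs) with h | h | h
  · rw [if_neg (by omega), if_neg (by omega), max_eq_left h.le, List.filter_append]
    have hw : List.filter (fun v => PySem.Str.len v == pvM fs) [w] = [] := by
      simp only [List.filter_cons, List.filter_nil, beq_iff_eq]
      rw [if_neg (by omega)]
    rw [hw, List.append_nil]
  · rw [if_pos h, max_eq_left h.le, List.filter_append]
    have hw : List.filter (fun v => PySem.Str.len v == pvM fs) [w] = [w] := by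
      simp only [List.filter_cons, List.filter_nil, beq_iff_eq]
      rw [if_pos h]
    rw [hw]
  · rw [if_neg (by omega), if_pos h, max_eq_right h.le, List.filter_append]
    have hnil : List.filter (fun v => PySem.Str.len v == PySem.Str.len w) fs = [] := by
      apply List.filter_eq_nil_iff.mpr
      intro v hv
      have := pvM_ub fs v hv
      simp only [beq_iff_eq]
      omega
    have hw : List.filter (fun v => PySem.Str.len v == PySem.Str.len w) [w] = [w] := by
      simp
    rw [hnil, hw, List.nil_append]

lemma loopA_eq (l : List String) : ∀ (fs : List String),
    l.foldl (fun (st : Int × List String) word =>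
      if word_matches_all word then
        if PySem.Str.len word = st.1 then (st.1, st.2 ++ [word])
        else if PySem.Str.len word > st.1 then (PySem.Str.len word, [word])
        else st
      else st) (pvM fs, pvC fs)
    = (pvM (fs ++ l.filter word_matches_all), pvC (fs ++ l.filter word_matches_all)) := by
  induction l with
  | nil => intro fs; simp
  | cons w l ih =>
    intro fs
    by_cases hp : word_matches_all w
    · have hstep :
        (if ((w.toList.length : Int)) = pvM fs then (pvM fs, pvC fs ++ [w])
         else if pvM fs < ((w.toList.length : Int)) then (((w.toList.length : Int)), [w])
         else (pvM fs, pvC fs)) = (pvM (fs ++ [w]), pvC (fs ++ [w])) := by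
        rw [pvM_append, pvC_append]
        simp only [PySem.Str.len_eq, gt_iff_lt]
        split_ifs with h1 h2
        · rw [max_eq_left h1.le]
        · rw [max_eq_right h2.le]
        · rw [max_eq_left (by omega)]
      have ih' := ih (fs ++ [w])
      simp only [List.foldl_cons, List.filter_cons, hp, if_true, PySem.Str.len_eq,
        gt_iff_lt] at ih' ⊢
      rw [hstep, ih']
      simp [List.append_assoc]
    · have ih0 := ih fs
      simp only [PySem.Str.len_eq, gt_iff_lt] at ih0 ⊢
      simp only [List.foldl_cons, List.filter_cons, hp]
      simpa using ih0

lemma max?_step (x y : Int) (ys : List Int) :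
    PySem.List.max? (x :: y :: ys) id = PySem.List.max? (max x y :: ys) id := by
  simp only [PySem.List.max?, List.foldl_cons]
  congr 1
  by_cases h : x < y <;> simp [h, max_def] <;> omega

lemma max?_cons (xs : List Int) : ∀ (x : Int),
    PySem.List.max? (x :: xs) id = some (xs.foldl max x) := by
  induction xs with
  | nil => intro x; rfl
  | cons y ys ih =>
    intro x
    rw [max?_step, ih (max x y), List.foldl_cons]

lemma maxD_eq_pvM (fs : List String) :
    PySem.List.maxD (fs.map PySem.Str.len) id 0 = pvM fs := by
  cases fs with
  | nil => simp [PySem.List.maxD, PySem.List.max?, pvM]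
  | cons w fs =>
    have hlen : (0 : Int) ≤ PySem.Str.len w := by
      rw [PySem.Str.len_eq]; positivity
    simp only [PySem.List.maxD, List.map_cons, max?_cons, Option.getD_some, pvM,
      List.foldl_cons, max_eq_right hlen]

-- ===== VERDICT (by name: the statement is the Claim_ definition above) =====
theorem find_longest_match_spec : Claim_equal_find_longest_match := by
  intro array _
  unfold Spec_find_longest_match find_longest_match
  have h0 : ((0 : Int), ([] : List String)) = (pvM [], pvC []) := by simp [pvM, pvC]
  rw [h0, loopA_eq array []]
  rw [show find_longest_match_alt array =
      (PySem.List.maxD ((array.filter word_matches_all).map PySem.Str.len) id 0,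
       (array.filter word_matches_all).filter (fun w => PySem.Str.len w ==
         PySem.List.maxD ((array.filter word_matches_all).map PySem.Str.len) id 0)) from rfl]
  rw [maxD_eq_pvM]
  simp [pvC]
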